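-- pv_equiv track=rewrite | github.com/cc555cc/SQ-PM-proj | send_obd_data_to_kuksa.py | summarize_faults
-- ===== SOURCE A (Python) =====
-- def summarize_faults(injected_faults):
--     if not injected_faults:
--         return "none"
--
--     counts = {}
--     for item in injected_faults:
--         fault_name = item["fault"]
--         counts[fault_name] = counts.get(fault_name, 0) + 1
--
--     return ", ".join(f"{name}={count}" for name, count in sorted(counts.items()))
-- ===== SOURCE B (Python) =====
-- def summarize_faults(injected_faults):
--     if not injected_faults:
--         return "none"
--
--     names = sorted(item["fault"] for item in injected_faults)
--     parts = []
--     i = 0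
--     n = len(names)
--     while i < n:
--         j = i + 1
--         while j < n and names[j] == names[i]:
--             j += 1
--         parts.append(f"{names[i]}={j - i}")
--         i = j
--     return ", ".join(parts)
-- ===== Notes on version B (the rewrite author's own statement) =====
-- stated objective: alternative
-- what changed: B sorts the fault names first and emits one 'name=count' per consecutive run in a single grouped scan, instead of accumulating counts in a dict and sorting the dict items at the end.
import Mathlib
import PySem

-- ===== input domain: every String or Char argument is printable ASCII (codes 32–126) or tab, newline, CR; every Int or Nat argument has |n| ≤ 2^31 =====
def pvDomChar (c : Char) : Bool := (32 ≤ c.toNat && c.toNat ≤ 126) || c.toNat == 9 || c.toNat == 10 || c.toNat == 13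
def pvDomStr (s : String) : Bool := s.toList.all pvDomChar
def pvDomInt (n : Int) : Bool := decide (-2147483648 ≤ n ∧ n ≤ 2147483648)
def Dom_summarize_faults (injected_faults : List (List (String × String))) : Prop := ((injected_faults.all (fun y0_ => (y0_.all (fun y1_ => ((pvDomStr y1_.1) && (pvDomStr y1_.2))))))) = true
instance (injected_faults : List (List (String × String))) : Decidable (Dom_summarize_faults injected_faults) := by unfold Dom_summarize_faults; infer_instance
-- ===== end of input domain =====

-- B groups a sorted copy of the fault names in one scan instead of A's dict-count-then-sort; same cost, different decomposition.

-- shared helper: the f-string `f"{name}={count}"` (identical in both Pythons)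
def pvFmt (p : String × Int) : String := p.1 ++ "=" ++ PySem.Int.toStr p.2

-- `item["fault"]`: first-match lookup; `none` (Python KeyError) is excluded by Pre_, the `.getD ""` is never reached there
def pvFault (item : List (String × String)) : String := ((PySem.Dict.mk item).get? "fault").getD ""

-- ===== PORT A =====
def summarize_faults (injected_faults : List (List (String × String))) : String :=
  if injected_faults.isEmpty then "none"
  else
    -- counts = {}; for item: counts[fault_name] = counts.get(fault_name, 0) + 1
    let counts : PySem.Dict String Int := injected_faults.foldl
      (fun d item =>
        let fault_name := pvFault item
        d.insert fault_name (d.getD fault_name 0 + 1)) PySem.Dict.empty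
    -- sorted(counts.items()): Python tuple comparison = lexicographic on (name, count); str `<` is `<` on .toList
    PySem.Str.join ", "
      ((PySem.List.sorted counts.items (fun p => toLex (p.1.toList, p.2))).map pvFmt)

-- ===== PORT B =====
-- the grouped scan: one `name=count` per maximal run of equal consecutive names
def pvRunsFmt : List String → List String
  | [] => []
  | n :: rest =>
      let same := rest.takeWhile (fun m => m == n)
      pvFmt (n, (1 + same.length : Int)) :: pvRunsFmt (rest.dropWhile (fun m => m == n))
termination_by l => l.length
decreasing_by
  simp only [List.length_cons]
  exact Nat.lt_succ_of_le (List.length_dropWhile_le _ _)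

def summarize_faults_alt (injected_faults : List (List (String × String))) : String :=
  if injected_faults.isEmpty then "none"
  else
    let names := PySem.List.sorted (injected_faults.map pvFault) (fun s => s.toList)
    PySem.Str.join ", " (pvRunsFmt names)

-- ===== PRECONDITION & SPEC =====
-- Pre_: every item has a "fault" key; on other (non-empty) inputs Python A raises KeyError (`item["fault"]`).
def Pre_summarize_faults (injected_faults : List (List (String × String))) : Prop :=
  (injected_faults.all (fun item => item.any (fun kv => kv.1 == "fault"))) = true
instance (injected_faults : List (List (String × String))) : Decidable (Pre_summarize_faults injected_faults) := by unfold Pre_summarize_faults; infer_instance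

def pvWitness_summarize_faults : (List (List (String × String))) :=
  [[("fault", "dtc"), ("sev", "1")], [("fault", "abs")], [("fault", "dtc")]]

def Spec_summarize_faults (injected_faults : List (List (String × String))) (out : String) : Prop := out = summarize_faults_alt injected_faults
instance (injected_faults : List (List (String × String))) (out : String) : Decidable (Spec_summarize_faults injected_faults out) := by unfold Spec_summarize_faults; infer_instance

-- ===== CLAIM (what is proved, stated in full; the proofs are below) =====
def Claim_equal_summarize_faults : Prop := ∀ (injected_faults : List (List (String × String))), Dom_summarize_faults injected_faults → Pre_summarize_faults injected_faults → Spec_summarize_faults injected_faults (summarize_faults injected_faults)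

-- ===== LEMMAS AND PROOFS =====

-- the pairs behind pvRunsFmt, for reasoning
def pvRuns : List String → List (String × Int)
  | [] => []
  | n :: rest =>
      (n, (1 + (rest.takeWhile (fun m => m == n)).length : Int)) :: pvRuns (rest.dropWhile (fun m => m == n))
termination_by l => l.length
decreasing_by
  simp only [List.length_cons]
  exact Nat.lt_succ_of_le (List.length_dropWhile_le _ _)

theorem pvRunsFmt_eq_map (l : List String) : pvRunsFmt l = (pvRuns l).map pvFmt := by
  induction l using pvRunsFmt.induct with
  | case1 => simp [pvRunsFmt, pvRuns]
  | case2 n rest ih =>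
      rw [pvRunsFmt, pvRuns]
      simp [ih]

theorem pv_dropWhile_gt {n : String} {rest : List String}
    (hs : rest.Pairwise (fun a b => a.toList ≤ b.toList))
    (hn : ∀ x ∈ rest, n.toList ≤ x.toList) :
    ∀ x ∈ rest.dropWhile (fun m => m == n), n.toList < x.toList := by
  intro x hx
  have hsub : (rest.dropWhile (fun m => m == n)).Sublist rest := List.dropWhile_sublist _
  have hsd : (rest.dropWhile (fun m => m == n)).Pairwise (fun a b => a.toList ≤ b.toList) :=
    hs.sublist hsub
  cases hd : rest.dropWhile (fun m => m == n) with
  | nil => rw [hd] at hx; cases hx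
  | cons d ds =>
      have hdne : d ≠ n := by
        have := List.head?_dropWhile_not (fun m => m == n) rest
        rw [hd] at this
        simpa using this
      have hdmem : d ∈ rest := hsub.mem (by rw [hd]; exact List.mem_cons_self)
      have hnd : n.toList ≤ d.toList := hn d hdmem
      have hndlt : n.toList < d.toList := by
        rcases lt_or_eq_of_le hnd with h | h
        · exact h
        · exact absurd (String.toList_injective h.symm) hdne
      rw [hd] at hx hsd
      rcases List.mem_cons.mp hx with rfl | hx'
      · exact hndlt
      · have : d.toList ≤ x.toList := (List.pairwise_cons.mp hsd).1 x hx'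
        exact lt_of_lt_of_le hndlt this

-- counting in the head run / past the head run of a sorted list
theorem pv_count_head {n : String} {rest : List String}
    (hs : rest.Pairwise (fun a b => a.toList ≤ b.toList))
    (hn : ∀ x ∈ rest, n.toList ≤ x.toList) :
    rest.count n = (rest.takeWhile (fun m => m == n)).length := by
  have hc : rest.count n
      = (rest.takeWhile (fun m => m == n)).count n
        + (rest.dropWhile (fun m => m == n)).count n := by
    conv_lhs => rw [← List.takeWhile_append_dropWhile (p := fun m => m == n) (l := rest)]
    rw [List.count_append]
  have h1 : (rest.takeWhile (fun m => m == n)).count n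
      = (rest.takeWhile (fun m => m == n)).length := by
    apply List.count_eq_length.mpr
    intro x hx
    have := List.mem_takeWhile_imp hx
    exact (by simpa using this : x = n).symm
  have h2 : (rest.dropWhile (fun m => m == n)).count n = 0 := by
    apply List.count_eq_zero.mpr
    intro hmem
    exact absurd (pv_dropWhile_gt hs hn n hmem) (lt_irrefl _)
  omega

theorem pv_count_tail {n k : String} {rest : List String} (hkn : k ≠ n) :
    rest.count k = (rest.dropWhile (fun m => m == n)).count k := by
  have hc : rest.count k
      = (rest.takeWhile (fun m => m == n)).count k
        + (rest.dropWhile (fun m => m == n)).count k := by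
    conv_lhs => rw [← List.takeWhile_append_dropWhile (p := fun m => m == n) (l := rest)]
    rw [List.count_append]
  have h1 : (rest.takeWhile (fun m => m == n)).count k = 0 := by
    apply List.count_eq_zero.mpr
    intro hmem
    have := List.mem_takeWhile_imp hmem
    exact hkn (by simpa using this)
  omega

theorem pv_runs_mem {l : List String}
    (hs : l.Pairwise (fun a b => a.toList ≤ b.toList)) :
    ∀ k v, (k, v) ∈ pvRuns l ↔ k ∈ l ∧ v = (l.count k : Int) := by
  induction l using pvRuns.induct with
  | case1 => simp [pvRuns]
  | case2 n rest ih =>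
      intro k v
      have hpc := List.pairwise_cons.mp hs
      have hdrop := pv_dropWhile_gt hpc.2 hpc.1
      have htake : ∀ x ∈ rest.takeWhile (fun m => m == n), x = n := by
        intro x hx
        simpa using List.mem_takeWhile_imp hx
      have ihs := ih (hpc.2.sublist (List.dropWhile_sublist _))
      rw [pvRuns]
      simp only [List.mem_cons]
      constructor
      · rintro (h | h)
        · rw [Prod.mk.injEq] at h
          obtain ⟨rfl, rfl⟩ := h
          refine ⟨Or.inl rfl, ?_⟩
          rw [List.count_cons_self, pv_count_head hpc.2 hpc.1]
          push_cast
          ring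
        · obtain ⟨hk, hv⟩ := (ihs k v).mp h
          have hkr : k ∈ rest := (List.dropWhile_sublist _).mem hk
          have hkn : k ≠ n := by
            intro heq; subst heq
            exact absurd (hdrop k hk) (lt_irrefl _)
          refine ⟨Or.inr hkr, ?_⟩
          rw [List.count_cons_of_ne (Ne.symm hkn), pv_count_tail hkn]
          exact hv
      · rintro ⟨hk, rfl⟩
        by_cases hkn : k = n
        · subst hkn
          left
          rw [Prod.mk.injEq]
          refine ⟨rfl, ?_⟩
          rw [List.count_cons_self, pv_count_head hpc.2 hpc.1]
          push_cast
          ring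
        · right
          have hkr : k ∈ rest := by
            rcases hk with h | h
            · exact absurd h hkn
            · exact h
          have hkd : k ∈ rest.dropWhile (fun m => m == n) := by
            have := List.takeWhile_append_dropWhile (p := fun m => m == n) (l := rest)
            rcases List.mem_append.mp (by rw [this]; exact hkr) with h | h
            · exact absurd (htake k h) hkn
            · exact h
          have hcnt : (n :: rest).count k = (rest.dropWhile (fun m => m == n)).count k := by
            rw [List.count_cons_of_ne (Ne.symm hkn), pv_count_tail hkn]
          rw [hcnt]
          exact (ihs k _).mpr ⟨hkd, rfl⟩

theorem pv_runs_pairwise {l : List String}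
    (hs : l.Pairwise (fun a b => a.toList ≤ b.toList)) :
    (pvRuns l).Pairwise (fun p q => p.1.toList < q.1.toList) := by
  induction l using pvRuns.induct with
  | case1 => simp [pvRuns]
  | case2 n rest ih =>
      have hpc := List.pairwise_cons.mp hs
      have hdrop := pv_dropWhile_gt hpc.2 hpc.1
      have hsd := hpc.2.sublist (List.dropWhile_sublist (l := rest) (p := fun m => m == n))
      rw [pvRuns]
      refine List.pairwise_cons.mpr ⟨?_, ih hsd⟩
      intro q hq
      have hqmem : q.1 ∈ rest.dropWhile (fun m => m == n) :=
        ((pv_runs_mem hsd q.1 q.2).mp (by simpa using hq)).1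
      exact hdrop q.1 hqmem

-- A's dict fold over the items is `Dict.counter` of the fault-name list
theorem pv_counts_eq_counter (fs : List (List (String × String))) :
    fs.foldl (fun d item =>
        let fault_name := pvFault item
        d.insert fault_name (d.getD fault_name 0 + 1)) PySem.Dict.empty
      = PySem.Dict.counter (fs.map pvFault) := by
  rw [PySem.Dict.counter_eq_foldl, List.foldl_map]
  rfl

-- the two String-sorts differ only in which Decidable instance witnesses `<` on `List Char`
theorem pv_sortedStr_LO (names : List String) :
    PySem.List.sorted names (fun s => s.toList)
      = @PySem.List.sorted String (List Char) List.instLinearOrder.toLT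
          LinearOrder.toDecidableLT names (fun s => s.toList) false := by
  congr 1

-- the heart: sorting the counter's items (Python tuple order) = grouping the sorted names
theorem pv_sorted_items_eq_runs (names : List String) :
    PySem.List.sorted (PySem.Dict.counter names).items (fun p => toLex (p.1.toList, p.2))
      = pvRuns (PySem.List.sorted names (fun s => s.toList)) := by
  rw [pv_sortedStr_LO]
  have hMs := PySem.List.sorted_pairwise names (fun s => s.toList)
  have hMperm := @PySem.List.sorted_perm String (List Char) List.instLinearOrder.toLT
    LinearOrder.toDecidableLT names (fun s => s.toList) false
  apply PySem.List.sorted_eq_of_perm_of_pairwise_lt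
  · -- the grouped runs are a rearrangement of the counter's items
    rw [PySem.Dict.items_counter]
    apply List.perm_of_nodup_nodup_toFinset_eq
    · exact (pv_runs_pairwise hMs).imp
        (fun hpq h => by rw [h] at hpq; exact lt_irrefl _ hpq)
    · refine List.Nodup.map ?_ (PySem.Set.nodup_ofList names)
      intro a b hab
      exact (Prod.mk.inj hab).1
    · ext ⟨k, v⟩
      simp only [List.mem_toFinset, List.mem_map, pv_runs_mem hMs k v, PySem.Set.mem_ofList,
        Prod.mk.injEq]
      constructor
      · rintro ⟨hk, rfl⟩
        exact ⟨k, hMperm.mem_iff.mp hk, rfl, by rw [hMperm.count_eq]⟩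
      · rintro ⟨k', hk', rfl, rfl⟩
        exact ⟨hMperm.mem_iff.mpr hk', by rw [hMperm.count_eq]⟩
  · -- strictly increasing in the lex key (the names are pairwise distinct)
    exact (pv_runs_pairwise hMs).imp (fun hpq => Prod.Lex.lt_iff.mpr (Or.inl hpq))

-- ===== VERDICT (by name: the statement is the Claim_ definition above) =====
theorem summarize_faults_spec : Claim_equal_summarize_faults := by
  intro fs _hdom _hpre
  show summarize_faults fs = summarize_faults_alt fs
  unfold summarize_faults summarize_faults_alt
  by_cases h : fs.isEmpty
  · simp [h]
  · simp only [h]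
    rw [pv_counts_eq_counter, pv_sorted_items_eq_runs, pvRunsFmt_eq_map]
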